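-- pv_equiv track=rewrite | github.com/dgunning/edgartools | edgar/xbrl/statements.py | _split_allcaps
-- ===== SOURCE A (Python) =====
-- _FINANCIAL_WORDS = [
--     # 14-letter words
--     'POSTRETIREMENT',
--     # 13-letter words
--     'COMPREHENSIVE', 'CONTINGENCIES', 'ESTABLISHMENT', 'EXTRAORDINARY', 'RESTRUCTURING',
--     'STOCKHOLDERS',
--     # 12-letter words
--     'ACQUISITIONS', 'ARRANGEMENTS', 'COMPENSATION', 'CONSOLIDATED', 'DIVESTITURES',
--     'INSTRUMENTS', 'MEASUREMENTS', 'SHAREHOLDERS', 'SHAREOWNERS',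
--     # 11-letter words
--     'COMMITMENTS', 'INFORMATION', 'INVESTMENTS', 'RECEIVABLES', 'SIGNIFICANT',
--     # 10-letter words
--     'ACCOUNTING', 'BORROWING', 'DEPRECIATION', 'INTANGIBLE', 'STATEMENTS',
--     # 9-letter words
--     'DOCUMENT', 'EARNINGS', 'ENTITY', 'EXPENSES', 'FINANCIAL', 'GOODWILL',
--     'OPERATING', 'PROVISION', 'REPORTING', 'REVENUES', 'SEGMENTS',
--     # 8-letter words
--     'ACCRUED', 'BALANCES', 'BUSINESS', 'PAYABLE', 'POLICIES', 'PROPERTY',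
--     # 7-letter words
--     'BALANCE', 'HEDGING', 'REVENUE', 'SUMMARY', 'SUPPLY',
--     # 6-letter words
--     'ASSETS', 'EQUITY', 'INCOME', 'LEASES', 'SHARES', 'STOCK',
--     # 5-letter words
--     'BASED', 'CHAIN', 'MONEY', 'OTHER', 'PLANS', 'TAXES', 'VALUE',
--     # 4-letter words
--     'CASH', 'DEBT', 'FAIR', 'FLOW', 'ITEM', 'LINE', 'LONG', 'LOSS', 'TERM',
--     # 3-letter words
--     'AND', 'FOR', 'NET', 'NON', 'PER', 'THE',
--     # 2-letter words
--     'OF',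
-- ]
--
-- def _split_allcaps(text: str) -> str:
--     """
--     Split an ALL-CAPS string into title-cased words using a greedy dictionary approach.
--
--     Uses a dictionary of common financial terms to split strings like
--     'INCOMETAXES' → 'Income Taxes' and 'DEBTANDBORROWINGARRANGEMENTS' → 'Debt And Borrowing Arrangements'.
--
--     Non-ALL-CAPS strings are returned unchanged.
--     """
--     if not text or not text.isupper() or len(text) <= 1:
--         return text
--
--     remaining = text
--     words = []
--     while remaining:
--         matched = False
--         for word in _FINANCIAL_WORDS:
--             if remaining.startswith(word):
--                 words.append(word.title())
--                 remaining = remaining[len(word):]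
--                 matched = True
--                 break
--         if not matched:
--             # Take the next character as its own fragment
--             words.append(remaining[0])
--             remaining = remaining[1:]
--
--     return ' '.join(words)
-- ===== SOURCE B (Python) =====
-- _FINANCIAL_WORDS = [
--     'POSTRETIREMENT',
--     'COMPREHENSIVE', 'CONTINGENCIES', 'ESTABLISHMENT', 'EXTRAORDINARY', 'RESTRUCTURING',
--     'STOCKHOLDERS',
--     'ACQUISITIONS', 'ARRANGEMENTS', 'COMPENSATION', 'CONSOLIDATED', 'DIVESTITURES',
--     'INSTRUMENTS', 'MEASUREMENTS', 'SHAREHOLDERS', 'SHAREOWNERS',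
--     'COMMITMENTS', 'INFORMATION', 'INVESTMENTS', 'RECEIVABLES', 'SIGNIFICANT',
--     'ACCOUNTING', 'BORROWING', 'DEPRECIATION', 'INTANGIBLE', 'STATEMENTS',
--     'DOCUMENT', 'EARNINGS', 'ENTITY', 'EXPENSES', 'FINANCIAL', 'GOODWILL',
--     'OPERATING', 'PROVISION', 'REPORTING', 'REVENUES', 'SEGMENTS',
--     'ACCRUED', 'BALANCES', 'BUSINESS', 'PAYABLE', 'POLICIES', 'PROPERTY',
--     'BALANCE', 'HEDGING', 'REVENUE', 'SUMMARY', 'SUPPLY',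
--     'ASSETS', 'EQUITY', 'INCOME', 'LEASES', 'SHARES', 'STOCK',
--     'BASED', 'CHAIN', 'MONEY', 'OTHER', 'PLANS', 'TAXES', 'VALUE',
--     'CASH', 'DEBT', 'FAIR', 'FLOW', 'ITEM', 'LINE', 'LONG', 'LOSS', 'TERM',
--     'AND', 'FOR', 'NET', 'NON', 'PER', 'THE',
--     'OF',
-- ]
--
-- # Longest-prefix match against a hash set: in this dictionary no word listed
-- # earlier is a proper prefix of a later word, so the greedy list order of A
-- # coincides with longest-prefix matching.
-- _WORD_SET = frozenset(_FINANCIAL_WORDS)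
-- _MAX_LEN = 14  # length of the longest dictionary word
--
--
-- def _split_allcaps(text: str) -> str:
--     if not text or not text.isupper() or len(text) <= 1:
--         return text
--
--     words = []
--     remaining = text
--     while remaining:
--         for n in range(min(_MAX_LEN, len(remaining)), 1, -1):
--             if remaining[:n] in _WORD_SET:
--                 words.append(remaining[:n].title())
--                 remaining = remaining[n:]
--                 break
--         else:
--             words.append(remaining[0])
--             remaining = remaining[1:]
--
--     return ' '.join(words)
-- ===== Notes on version B (the rewrite author's own statement) =====
-- stated objective: alternative
-- what changed: Replaces the inner ordered scan over the 77-word list (first list entry that is a prefix wins) by longest-prefix matching: candidate lengths are tried from 14 down to 2 and the slice is tested against a hash set; equal because no dictionary word listed earlier is a proper prefix of a later one.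
import Mathlib
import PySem

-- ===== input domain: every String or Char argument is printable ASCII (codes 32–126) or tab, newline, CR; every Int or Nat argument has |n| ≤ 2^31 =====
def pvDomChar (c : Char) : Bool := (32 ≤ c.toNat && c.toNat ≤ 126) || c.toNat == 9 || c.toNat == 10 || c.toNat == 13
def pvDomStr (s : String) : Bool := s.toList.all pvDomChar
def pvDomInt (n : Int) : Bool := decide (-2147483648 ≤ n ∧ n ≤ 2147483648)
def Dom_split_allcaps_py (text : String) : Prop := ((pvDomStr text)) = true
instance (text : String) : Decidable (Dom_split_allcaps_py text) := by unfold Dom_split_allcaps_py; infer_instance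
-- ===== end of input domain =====

-- B replaces A's inner ordered scan over the 77-word list by longest-prefix matching
-- (candidate lengths 14 down to 2 against a hash set); objective: alternative algorithm.

-- shared constant of both Pythons: the financial-word dictionary, as char lists
def finWords : List (List Char) :=
  (["POSTRETIREMENT",
    "COMPREHENSIVE", "CONTINGENCIES", "ESTABLISHMENT", "EXTRAORDINARY", "RESTRUCTURING",
    "STOCKHOLDERS",
    "ACQUISITIONS", "ARRANGEMENTS", "COMPENSATION", "CONSOLIDATED", "DIVESTITURES",
    "INSTRUMENTS", "MEASUREMENTS", "SHAREHOLDERS", "SHAREOWNERS",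
    "COMMITMENTS", "INFORMATION", "INVESTMENTS", "RECEIVABLES", "SIGNIFICANT",
    "ACCOUNTING", "BORROWING", "DEPRECIATION", "INTANGIBLE", "STATEMENTS",
    "DOCUMENT", "EARNINGS", "ENTITY", "EXPENSES", "FINANCIAL", "GOODWILL",
    "OPERATING", "PROVISION", "REPORTING", "REVENUES", "SEGMENTS",
    "ACCRUED", "BALANCES", "BUSINESS", "PAYABLE", "POLICIES", "PROPERTY",
    "BALANCE", "HEDGING", "REVENUE", "SUMMARY", "SUPPLY",
    "ASSETS", "EQUITY", "INCOME", "LEASES", "SHARES", "STOCK",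
    "BASED", "CHAIN", "MONEY", "OTHER", "PLANS", "TAXES", "VALUE",
    "CASH", "DEBT", "FAIR", "FLOW", "ITEM", "LINE", "LONG", "LOSS", "TERM",
    "AND", "FOR", "NET", "NON", "PER", "THE",
    "OF"] : List String).map String.toList

-- hand port of Python str.isupper (exact on ASCII, where the cased characters are the letters):
-- at least one cased character and every cased character uppercase
def pyStrIsupper (cs : List Char) : Bool :=
  cs.any (fun c => PySem.Chars.isalpha c) &&
  cs.all (fun c => !PySem.Chars.isalpha c || PySem.Chars.isupper c)

-- hand port of str.title(): exact for the nonempty all-uppercase alphabetic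
-- dictionary words it is applied to (first char kept, rest lowercased)
def pyTitleWord : List Char → List Char
  | [] => []
  | c :: cs => c :: PySem.Chars.lower cs

-- ===== PORT A =====
-- the inner 'for word in _FINANCIAL_WORDS: if remaining.startswith(word): break' loop
def aFind : List (List Char) → List Char → Option (List Char)
  | [], _ => none
  | w :: ws, r => if PySem.Chars.startswith r w then some w else aFind ws r

theorem aFind_some_mem_prefix : ∀ (ws : List (List Char)) (r w : List Char),
    aFind ws r = some w → w ∈ ws ∧ w <+: r := by
  intro ws
  induction ws with
  | nil => intro r w h; simp [aFind] at h
  | cons u tl ih =>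
    intro r w h
    by_cases hu : PySem.Chars.startswith r u = true
    · simp [aFind, hu] at h
      subst h
      exact ⟨List.mem_cons_self, (PySem.Chars.startswith_iff _ _).mp hu⟩
    · simp [aFind, hu] at h
      obtain ⟨hm, hp⟩ := ih r w h
      exact ⟨List.mem_cons_of_mem _ hm, hp⟩

theorem finWords_len : ∀ w ∈ finWords, 2 ≤ w.length ∧ w.length ≤ 14 := by decide

-- the 'while remaining:' loop of A
def aLoop (r : List Char) : List (List Char) :=
  if hr : r = [] then []
  else
    match hf : aFind finWords r with
    | some w => pyTitleWord w :: aLoop (r.drop w.length)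
    | none => [r.head hr] :: aLoop r.tail
termination_by r.length
decreasing_by
  · obtain ⟨hm, _⟩ := aFind_some_mem_prefix _ _ _ hf
    have h2 := (finWords_len w hm).1
    have hlen : r.length ≠ 0 := fun h => hr (List.length_eq_zero_iff.mp h)
    simp [List.length_drop]; omega
  · have : r.length ≠ 0 := fun h => hr (List.length_eq_zero_iff.mp h)
    simp [List.length_tail]; omega

def split_allcaps_py (text : String) : String :=
  if text.toList = [] then text
  else if pyStrIsupper text.toList = false then text
  else if text.toList.length ≤ 1 then text
  else String.ofList (PySem.Chars.join [' '] (aLoop text.toList))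

-- ===== PORT B =====
-- the word set of Source B
def wordSet : PySem.Set (List Char) := PySem.Set.ofList finWords

-- the 'for n in range(min(14, len(remaining)), 1, -1): if remaining[:n] in _WORD_SET: break' loop
def bFind (r : List Char) (n : Nat) : Option Nat :=
  if 2 ≤ n then
    if PySem.Set.contains wordSet (r.take n) then some n else bFind r (n - 1)
  else none
termination_by n

theorem bFind_some_bounds : ∀ (r : List Char) (n m : Nat),
    bFind r n = some m → 2 ≤ m ∧ m ≤ n := by
  intro r n
  induction n with
  | zero => intro m h; rw [bFind] at h; simp at h
  | succ k ih =>
    intro m h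
    rw [bFind] at h
    simp only [Nat.add_sub_cancel] at h
    by_cases h2 : 2 ≤ k + 1
    · simp only [if_pos h2] at h
      by_cases hc : PySem.Set.contains wordSet (r.take (k + 1)) = true
      · rw [if_pos hc] at h
        have : k + 1 = m := Option.some.inj h
        omega
      · rw [if_neg hc] at h
        have := ih m h
        omega
    · simp [h2] at h

-- the 'while remaining:' loop of B
def bLoop (r : List Char) : List (List Char) :=
  if hr : r = [] then []
  else
    match hf : bFind r (min 14 r.length) with
    | some n => pyTitleWord (r.take n) :: bLoop (r.drop n)
    | none => [r.head hr] :: bLoop r.tail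
termination_by r.length
decreasing_by
  · obtain ⟨h2, _⟩ := bFind_some_bounds _ _ _ hf
    have : r.length ≠ 0 := fun h => hr (List.length_eq_zero_iff.mp h)
    simp [List.length_drop]; omega
  · have : r.length ≠ 0 := fun h => hr (List.length_eq_zero_iff.mp h)
    simp [List.length_tail]; omega

def split_allcaps_py_alt (text : String) : String :=
  if text.toList = [] then text
  else if pyStrIsupper text.toList = false then text
  else if text.toList.length ≤ 1 then text
  else String.ofList (PySem.Chars.join [' '] (bLoop text.toList))

-- ===== PRECONDITION & SPEC =====
def Spec_split_allcaps_py (text : String) (out : String) : Prop := out = split_allcaps_py_alt text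
instance (text : String) (out : String) : Decidable (Spec_split_allcaps_py text out) := by unfold Spec_split_allcaps_py; infer_instance

-- ===== CLAIM (what is proved, stated in full; the proofs are below) =====
def Claim_equal_split_allcaps_py : Prop := ∀ (text : String), Dom_split_allcaps_py text → Spec_split_allcaps_py text (split_allcaps_py text)

-- ===== LEMMAS AND PROOFS =====

-- no dictionary word listed earlier is a proper prefix of a later one,
-- hence greedy list order = longest-prefix match
theorem finWords_pairwise : finWords.Pairwise (fun u v => u <+: v → u = v) := by decide

theorem aFind_eq_none_iff (ws : List (List Char)) (r : List Char) :
    aFind ws r = none ↔ ∀ w ∈ ws, ¬ w <+: r := by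
  induction ws with
  | nil => simp [aFind]
  | cons u tl ih =>
    by_cases hu : PySem.Chars.startswith r u = true
    · have hur := (PySem.Chars.startswith_iff r u).mp hu
      constructor
      · intro h; simp [aFind, hu] at h
      · intro h; exact absurd hur (h u List.mem_cons_self)
    · have hu' : ¬ u <+: r := fun h => hu ((PySem.Chars.startswith_iff _ _).mpr h)
      simp [aFind, hu, ih, hu']

theorem aFind_first (ws : List (List Char)) (r m : List Char)
    (hpw : ws.Pairwise (fun u v => u <+: v → u = v))
    (hm : m ∈ ws) (hpre : m <+: r)
    (hlong : ∀ u ∈ ws, u <+: r → u <+: m) :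
    aFind ws r = some m := by
  induction ws with
  | nil => simp at hm
  | cons u tl ih =>
    rw [List.pairwise_cons] at hpw
    by_cases hu : PySem.Chars.startswith r u = true
    · have hur : u <+: r := (PySem.Chars.startswith_iff _ _).mp hu
      have hum : u <+: m := hlong u List.mem_cons_self hur
      rcases List.mem_cons.mp hm with h | h
      · simp [aFind, hu, h]
      · have heq : u = m := hpw.1 m h hum
        subst heq
        simp [aFind, hu]
    · have hur : ¬ u <+: r := fun h => hu ((PySem.Chars.startswith_iff _ _).mpr h)
      have hmtl : m ∈ tl := by
        rcases List.mem_cons.mp hm with h | h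
        · exact absurd (h ▸ hpre) hur
        · exact h
      simp only [aFind, hu]
      exact ih hpw.2 hmtl (fun u hu' hp => hlong u (List.mem_cons_of_mem _ hu') hp)

theorem mem_wordSet_iff (x : List Char) :
    PySem.Set.contains wordSet x = true ↔ x ∈ finWords := by
  rw [wordSet, PySem.Set.contains_iff, PySem.Set.mem_ofList]

theorem bFind_none_iff (r : List Char) (n : Nat) :
    bFind r n = none ↔ ∀ m, 2 ≤ m → m ≤ n → PySem.Set.contains wordSet (r.take m) = false := by
  induction n with
  | zero =>
    constructor
    · intro _ m hm2 hm0; omega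
    · intro _; rw [bFind]; simp
  | succ k ih =>
    rw [bFind]
    simp only [Nat.add_sub_cancel]
    by_cases h2 : 2 ≤ k + 1
    · simp only [if_pos h2]
      by_cases hc : PySem.Set.contains wordSet (r.take (k + 1)) = true
      · rw [if_pos hc]
        constructor
        · intro h; exact absurd h (by simp)
        · intro h
          have := h (k + 1) h2 (le_refl _)
          rw [this] at hc; exact Bool.noConfusion hc
      · have hc' : PySem.Set.contains wordSet (r.take (k + 1)) = false := by
          simpa using hc
        rw [if_neg hc, ih]
        constructor
        · intro h m hm2 hmk
          rcases Nat.lt_or_ge m (k + 1) with h' | h'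
          · exact h m hm2 (by omega)
          · have : m = k + 1 := by omega
            rw [this]; exact hc'
        · intro h m hm2 hmk; exact h m hm2 (by omega)
    · simp only [if_neg h2]
      constructor
      · intro _ m hm2 hmk; omega
      · intro _; trivial

theorem bFind_some_iff (r : List Char) (n m : Nat) (h : bFind r n = some m) :
    2 ≤ m ∧ m ≤ n ∧ PySem.Set.contains wordSet (r.take m) = true ∧
      ∀ k, m < k → k ≤ n → PySem.Set.contains wordSet (r.take k) = false := by
  induction n with
  | zero => rw [bFind] at h; simp at h
  | succ j ih =>
    rw [bFind] at h
    simp only [Nat.add_sub_cancel] at h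
    by_cases h2 : 2 ≤ j + 1
    · simp only [if_pos h2] at h
      by_cases hc : PySem.Set.contains wordSet (r.take (j + 1)) = true
      · rw [if_pos hc] at h
        have hm : j + 1 = m := Option.some.inj h
        subst hm
        exact ⟨h2, le_refl _, hc, fun k hk1 hk2 => by omega⟩
      · rw [if_neg hc] at h
        have hc' : PySem.Set.contains wordSet (r.take (j + 1)) = false := by simpa using hc
        obtain ⟨ha, hb, hcc, hd⟩ := ih h
        refine ⟨ha, by omega, hcc, fun k hk1 hk2 => ?_⟩
        rcases Nat.lt_or_ge k (j + 1) with h' | h'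
        · exact hd k hk1 (by omega)
        · have : k = j + 1 := by omega
          rw [this]; exact hc'
    · simp [h2] at h

-- one step of the two loops agrees: A's first-in-list prefix word is B's longest one
theorem step_eq (r : List Char) :
    aFind finWords r = (bFind r (min 14 r.length)).map (fun n => r.take n) := by
  cases hb : bFind r (min 14 r.length) with
  | none =>
    rw [Option.map_none, aFind_eq_none_iff]
    intro w hw hpre
    obtain ⟨hw2, hw14⟩ := finWords_len w hw
    have hwr : w.length ≤ r.length := hpre.length_le
    have htake : r.take w.length = w := (List.prefix_iff_eq_take.mp hpre).symm
    have hmin : w.length ≤ min 14 r.length := by omega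
    have hnone := (bFind_none_iff r (min 14 r.length)).mp hb w.length hw2 hmin
    rw [htake, (mem_wordSet_iff w).mpr hw] at hnone
    exact Bool.noConfusion hnone
  | some n =>
    obtain ⟨h2, hle, hc, hmax⟩ := bFind_some_iff r (min 14 r.length) n hb
    have hnr : n ≤ r.length := le_trans hle (min_le_right _ _)
    have hmem : r.take n ∈ finWords := (mem_wordSet_iff _).mp hc
    have hpre : r.take n <+: r := List.take_prefix n r
    rw [Option.map_some]
    apply aFind_first finWords r (r.take n) finWords_pairwise hmem hpre
    intro u hu hur
    obtain ⟨hu2, hu14⟩ := finWords_len u hu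
    have hulen : u.length ≤ r.length := hur.length_le
    have hutake : r.take u.length = u := (List.prefix_iff_eq_take.mp hur).symm
    have hun : u.length ≤ n := by
      by_contra hgt
      rw [Nat.not_le] at hgt
      have := hmax u.length hgt (by omega)
      rw [hutake, (mem_wordSet_iff u).mpr hu] at this
      simp at this
    rw [List.prefix_iff_eq_take, List.take_take, Nat.min_eq_left hun, hutake]

theorem loop_eq : ∀ (N : Nat) (r : List Char), r.length ≤ N → aLoop r = bLoop r := by
  intro N
  induction N with
  | zero =>
    intro r hr
    have : r = [] := List.length_eq_zero_iff.mp (by omega)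
    subst this
    rw [aLoop, bLoop]; simp
  | succ k ih =>
    intro r hr
    by_cases hnil : r = []
    · subst hnil; rw [aLoop, bLoop]; simp
    · have hlen : r.length ≠ 0 := fun h => hnil (List.length_eq_zero_iff.mp h)
      rw [aLoop, bLoop, dif_neg hnil, dif_neg hnil]
      cases hb : bFind r (min 14 r.length) with
      | none =>
        have ha : aFind finWords r = none := by rw [step_eq, hb]; rfl
        have htl : r.tail.length ≤ k := by simp [List.length_tail]; omega
        split
        · next w hw => rw [ha] at hw; exact absurd hw (by simp)
        · rw [ih r.tail htl]
      | some n =>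
        have ha : aFind finWords r = some (r.take n) := by rw [step_eq, hb]; rfl
        obtain ⟨h2, hle, _, _⟩ := bFind_some_iff r (min 14 r.length) n hb
        have hnr : n ≤ r.length := le_trans hle (min_le_right _ _)
        have hdl : (r.drop n).length ≤ k := by simp [List.length_drop]; omega
        split
        · next w hw =>
          rw [ha] at hw
          have hw' : r.take n = w := Option.some.inj hw
          subst hw'
          rw [List.length_take, Nat.min_eq_left hnr, ih (r.drop n) hdl]
        · next hw => rw [ha] at hw; exact absurd hw (by simp)

-- ===== VERDICT (by name: the statement is the Claim_ definition above) =====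
theorem split_allcaps_py_spec : Claim_equal_split_allcaps_py := by
  intro text _
  unfold Spec_split_allcaps_py split_allcaps_py split_allcaps_py_alt
  rw [loop_eq text.toList.length text.toList (le_refl _)]
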